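-- pv_equiv track=rewrite | github.com/syna222/MA_thesis_bundestagsprotokolle | 06)_remove_stopwords.py | get_least_common_words
-- ===== SOURCE A (Python) =====
-- from collections import Counter
--
-- def get_least_common_words(word_list):                #wörter die nur 1mal vorkommen
--     CounterVariable = Counter(word_list)
--     list_freq = CounterVariable.most_common()         #list of tuples with (word, freq)
--     #liste für wörter, die nur einmal vorkommen:
--     onesies_list = []
--     for item in list_freq:
--         if item[1] == 1:
--             onesies_list.append(item[0])
--     return onesies_list
-- ===== SOURCE B (Python) =====
-- def get_least_common_words(word_list):
--     seen = set()
--     duplicates = set()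
--     for w in word_list:
--         if w in seen:
--             duplicates.add(w)
--         else:
--             seen.add(w)
--     return [w for w in word_list if w not in duplicates]
-- ===== Notes on version B (the rewrite author's own statement) =====
-- stated objective: simpler
-- what changed: B replaces Counter + most_common() sorting + a count==1 scan by a single pass maintaining seen/duplicates sets and a filter of the original list by non-membership in duplicates; no counting and no sort happen.
import Mathlib
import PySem

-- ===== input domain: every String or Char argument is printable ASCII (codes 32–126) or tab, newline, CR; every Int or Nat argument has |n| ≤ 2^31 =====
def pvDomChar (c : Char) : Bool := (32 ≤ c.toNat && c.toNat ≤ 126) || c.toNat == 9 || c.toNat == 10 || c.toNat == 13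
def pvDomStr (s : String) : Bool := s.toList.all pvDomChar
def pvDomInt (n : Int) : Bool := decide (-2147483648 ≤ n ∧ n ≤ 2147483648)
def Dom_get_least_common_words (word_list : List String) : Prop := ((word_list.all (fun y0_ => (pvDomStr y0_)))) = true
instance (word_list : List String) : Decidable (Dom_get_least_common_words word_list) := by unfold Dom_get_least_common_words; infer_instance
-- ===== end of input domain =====

-- B replaces the Counter + most_common() sort + count==1 scan by one pass maintaining seen/duplicates
-- sets and a filter of the original list (objective: simpler).

-- ===== PORT A =====
def get_least_common_words (word_list : List String) : List String :=
  let counterVariable := PySem.Dict.counter word_list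
  -- most_common() = sorted(items, key=itemgetter(1), reverse=True) (stable)
  let list_freq := PySem.List.sorted counterVariable.items (fun p => p.2) true
  let onesies_list :=
    list_freq.foldl (fun acc item => if item.2 == 1 then acc ++ [item.1] else acc) []
  onesies_list

-- ===== PORT B =====
def get_least_common_words_alt (word_list : List String) : List String :=
  let sd := word_list.foldl
    (fun (sd : PySem.Set String × PySem.Set String) w =>
      if PySem.Set.contains sd.1 w then (sd.1, PySem.Set.add sd.2 w)
      else (PySem.Set.add sd.1 w, sd.2))
    (PySem.Set.empty, PySem.Set.empty)
  word_list.filter (fun w => !(PySem.Set.contains sd.2 w))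

-- ===== PRECONDITION & SPEC =====
def Spec_get_least_common_words (word_list : List String) (out : List String) : Prop := out = get_least_common_words_alt word_list
instance (word_list : List String) (out : List String) : Decidable (Spec_get_least_common_words word_list out) := by unfold Spec_get_least_common_words; infer_instance

-- ===== CLAIM (what is proved, stated in full; the proofs are below) =====
def Claim_equal_get_least_common_words : Prop := ∀ (word_list : List String), Dom_get_least_common_words word_list → Spec_get_least_common_words word_list (get_least_common_words word_list)

-- ===== LEMMAS AND PROOFS =====

-- filtering ignores an element inserted by insertBy when it fails the predicate
theorem pv_filter_insertBy_neg {α : Type} (bef : α → α → Bool) (P : α → Bool) (x : α)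
    (ys : List α) (hx : P x = false) :
    (PySem.List.insertBy bef x ys).filter P = ys.filter P := by
  induction ys with
  | nil => simp [PySem.List.insertBy, hx]
  | cons y ys ih =>
    by_cases h : bef x y = true
    · simp [PySem.List.insertBy, h, hx]
    · simp only [PySem.List.insertBy] at *
      rw [if_neg h]
      by_cases hy : P y = true <;> simp [hy, ih]

-- stability at the minimal key: the count-1 class of the reverse insertion sort is the
-- count-1 class of the input, in input order
theorem pv_foldl_insertBy_filter_one (l acc : List (String × Int))
    (hacc : ∀ x ∈ acc, 1 ≤ x.2) (hl : ∀ x ∈ l, 1 ≤ x.2) :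
    (l.foldl (fun acc x => PySem.List.insertBy (fun a b => decide (b.2 < a.2)) x acc) acc).filter
        (fun p => p.2 == 1)
      = acc.filter (fun p => p.2 == 1) ++ l.filter (fun p => p.2 == 1) := by
  induction l generalizing acc with
  | nil => simp
  | cons x l ih =>
    simp only [List.foldl_cons]
    by_cases hx : x.2 = 1
    · have hins : PySem.List.insertBy (fun a b => decide (b.2 < a.2)) x acc = acc ++ [x] := by
        apply PySem.List.insertBy_of_forall_not_before
        intro y hy
        have := hacc y hy
        simp [hx]
        omega
      rw [hins, ih (acc ++ [x])
        (by intro z hz; rcases List.mem_append.mp hz with h | h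
            · exact hacc z h
            · simp at h; subst h; omega)
        (fun z hz => hl z (List.mem_cons_of_mem _ hz))]
      simp [List.filter_append, hx]
    · have hxf : (fun p : String × Int => p.2 == 1) x = false := by simp [hx]
      rw [ih (PySem.List.insertBy (fun a b => decide (b.2 < a.2)) x acc)
        (by intro z hz
            rw [PySem.List.mem_insertBy] at hz
            rcases hz with rfl | hz
            · exact hl z (by simp)
            · exact hacc z hz)
        (fun z hz => hl z (List.mem_cons_of_mem _ hz))]
      rw [pv_filter_insertBy_neg (fun a b => decide (b.2 < a.2)) (fun p => p.2 == 1) x acc hxf]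
      simp [hxf]

-- A's value: the first occurrences (in order) of the words whose count is one
theorem pv_A_char (wl : List String) :
    get_least_common_words wl
      = (PySem.Set.ofList wl).filter (fun k => (wl.count k : Int) == 1) := by
  have hA : get_least_common_words wl
      = (PySem.List.sorted (PySem.Dict.counter wl).items (fun p => p.2) true).foldl
          (fun acc item => if item.2 == 1 then acc ++ [item.1] else acc) [] := rfl
  rw [hA]
  rw [PySem.List.foldl_append_if]
  rw [PySem.List.sorted_rev_eq_foldl_insertBy]
  rw [PySem.Dict.items_counter]
  rw [pv_foldl_insertBy_filter_one _ [] (by simp)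
    (by intro x hx
        simp only [List.mem_map] at hx
        obtain ⟨k, hk, rfl⟩ := hx
        have : k ∈ wl := (PySem.Set.mem_ofList _ _).mp hk
        have := List.count_pos_iff.mpr this
        simp; omega)]
  rw [List.filter_map]
  simp [Function.comp_def]

-- filtering a once-only predicate through ordered dedup (foldl Set.add) keeps the list itself
theorem pv_filter_foldl_add (l : List String) (p : String → Bool) :
    ∀ (s : List String), (∀ w, p w = true → l.count w + s.count w ≤ 1) →
    (l.foldl PySem.Set.add s).filter p = s.filter p ++ l.filter p := by
  induction l with
  | nil => simp
  | cons x l ih =>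
    intro s hcnt
    simp only [List.foldl_cons]
    by_cases hx : PySem.Set.contains s x = true
    · have hxs : x ∈ s := by simpa [PySem.Set.contains] using hx
      have hpx : p x = false := by
        by_contra h
        have hp : p x = true := by revert h; cases p x <;> simp
        have := hcnt x hp
        have h1 : 1 ≤ s.count x := List.count_pos_iff.mpr hxs
        simp [List.count_cons_self] at this
        omega
      rw [show PySem.Set.add s x = s by simp [PySem.Set.add, hxs]]
      rw [ih s (by intro w hw; have := hcnt w hw; simp [List.count_cons] at this ⊢; omega)]
      simp [hpx]
    · have hxs : x ∉ s := by simpa [PySem.Set.contains] using hx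
      rw [show PySem.Set.add s x = s ++ [x] by simp [PySem.Set.add, hxs]]
      rw [ih (s ++ [x])
        (by intro w hw; have := hcnt w hw
            simp only [List.count_append, List.count_cons, List.count_nil] at this ⊢
            split_ifs at this ⊢ <;> omega)]
      simp [List.filter_append, List.filter_cons]
      by_cases hp : p x = true <;> simp [hp]
  -- membership in B's duplicates accumulator
theorem pv_dups_mem (l : List String) :
    ∀ (s d : PySem.Set String) (w : String),
    (w ∈ (l.foldl
      (fun (sd : PySem.Set String × PySem.Set String) w =>
        if PySem.Set.contains sd.1 w then (sd.1, PySem.Set.add sd.2 w)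
        else (PySem.Set.add sd.1 w, sd.2)) (s, d)).2)
      ↔ (w ∈ d ∨ (w ∈ l ∧ w ∈ s) ∨ 2 ≤ l.count w) := by
  induction l with
  | nil => intro s d w; simp
  | cons x l ih =>
    intro s d w
    simp only [List.foldl_cons]
    by_cases hx : PySem.Set.contains s x = true
    · have hxs : x ∈ s := by simpa [PySem.Set.contains] using hx
      rw [if_pos hx, ih s (PySem.Set.add d x) w]
      rw [PySem.Set.mem_add]
      by_cases hwx : w = x
      · subst hwx
        simp [hxs]
      · simp only [List.count_cons, List.mem_cons, beq_iff_eq, hwx, if_false, add_zero]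
        rw [if_neg (fun h => hwx h.symm)]
        tauto
    · have hxs : x ∉ s := by simpa [PySem.Set.contains] using hx
      rw [if_neg hx, ih (PySem.Set.add s x) d w]
      rw [PySem.Set.mem_add]
      by_cases hwx : w = x
      · subst hwx
        by_cases hdw : w ∈ d
        · simp [hdw]
        · by_cases hml : w ∈ l
          · have := List.count_pos_iff.mpr hml
            simp [hdw, hxs, hml, List.count_cons_self]
          · have hc0 : l.count w = 0 := List.count_eq_zero.mpr hml
            simp [hdw, hxs, hml, List.count_cons_self, hc0]
      · simp only [List.count_cons, List.mem_cons, beq_iff_eq, hwx, if_false, add_zero]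
        rw [if_neg (fun h => hwx h.symm)]
        tauto

-- ===== VERDICT (by name: the statement is the Claim_ definition above) =====
theorem get_least_common_words_spec : Claim_equal_get_least_common_words := by
  intro wl _
  show get_least_common_words wl = get_least_common_words_alt wl
  rw [pv_A_char]
  unfold get_least_common_words_alt
  have hd : ∀ w, (w ∈ (wl.foldl
      (fun (sd : PySem.Set String × PySem.Set String) w =>
        if PySem.Set.contains sd.1 w then (sd.1, PySem.Set.add sd.2 w)
        else (PySem.Set.add sd.1 w, sd.2)) (PySem.Set.empty, PySem.Set.empty)).2)
      ↔ 2 ≤ wl.count w := by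
    intro w
    rw [pv_dups_mem wl PySem.Set.empty PySem.Set.empty w]
    simp [PySem.Set.empty]
  have hB : (wl.filter (fun w => !(PySem.Set.contains (wl.foldl
      (fun (sd : PySem.Set String × PySem.Set String) w =>
        if PySem.Set.contains sd.1 w then (sd.1, PySem.Set.add sd.2 w)
        else (PySem.Set.add sd.1 w, sd.2)) (PySem.Set.empty, PySem.Set.empty)).2 w)))
      = wl.filter (fun w => (wl.count w : Int) == 1) := by
    apply List.filter_congr
    intro w hw
    have h1 : 1 ≤ wl.count w := List.count_pos_iff.mpr hw
    have := hd w
    simp [PySem.Set.contains] at this ⊢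
    by_cases h2 : 2 ≤ wl.count w
    · have hne : ((wl.count w : Int)) ≠ 1 := by
        have : wl.count w ≠ 1 := by omega
        exact_mod_cast this
      simp [this.mpr h2, hne]
    · have hc1 : wl.count w = 1 := by omega
      have hnd := fun h => h2 (this.mp h)
      simp [hc1]
      exact hnd
  rw [hB]
  have hset : PySem.Set.ofList wl = wl.foldl PySem.Set.add [] := PySem.Set.ofList_eq_foldl wl
  rw [hset, pv_filter_foldl_add wl _ []
    (by intro w hw
        simp at hw ⊢
        omega)]
  simp
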